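-- pv_equiv track=rewrite | github.com/aryan15-cmd/acadevia-backend | app/utils/search.py | search_data
-- ===== SOURCE A (Python) =====
-- def normalize_query(query: str):
--     """Handle common abbreviations"""
--     query = query.lower()
--
--     replacements = {
--         "ml": "machine learning",
--         "ai": "artificial intelligence",
--         "dl": "deep learning",
--         "dbms": "database management system"
--     }
--
--     for k, v in replacements.items():
--         query = query.replace(k, v)
--
--     return query
--
-- def search_data(query: str, data: list, top_k: int = 3):
--     # 🔥 normalize query
--     query = normalize_query(query)
--     query_words = query.split()
--
--     scored = []
--
--     for row in data:
--         score = 0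
--
--         for word in query_words:
--             if word in row:
--                 score += 1
--
--         # ✅ only keep relevant rows
--         if score > 0:
--             scored.append((row, score))
--
--     # ❌ if nothing found
--     if not scored:
--         return []
--
--     # ✅ sort by relevance
--     scored.sort(key=lambda x: x[1], reverse=True)
--
--     # ✅ return only rows (top_k reduced for token saving)
--     return [row for row, _ in scored[:top_k]]
-- ===== SOURCE B (Python) =====
-- def normalize_query(query: str):
--     """Handle common abbreviations"""
--     query = query.lower()
--
--     replacements = {
--         "ml": "machine learning",
--         "ai": "artificial intelligence",
--         "dl": "deep learning",
--         "dbms": "database management system"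
--     }
--
--     for k, v in replacements.items():
--         query = query.replace(k, v)
--
--     return query
--
-- def search_data(query: str, data: list, top_k: int = 3):
--     # score every row once, then emit rows by score from high to low
--     # (a counting-sort sweep instead of sorting; stable by construction)
--     words = normalize_query(query).split()
--     scored = [(row, sum(1 for w in words if w in row)) for row in data]
--     ranked = []
--     for s in range(len(words), 0, -1):
--         ranked += [row for row, sc in scored if sc == s]
--     return ranked[:top_k]
-- ===== Notes on version B (the rewrite author's own statement) =====
-- stated objective: alternative
-- what changed: Replaced build-then-stable-sort-by-score with a single scoring pass followed by a counting-sort style sweep that emits rows score by score from highest to lowest, which reproduces the stable descending order without sorting; the empty-result special case disappears.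
import Mathlib
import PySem

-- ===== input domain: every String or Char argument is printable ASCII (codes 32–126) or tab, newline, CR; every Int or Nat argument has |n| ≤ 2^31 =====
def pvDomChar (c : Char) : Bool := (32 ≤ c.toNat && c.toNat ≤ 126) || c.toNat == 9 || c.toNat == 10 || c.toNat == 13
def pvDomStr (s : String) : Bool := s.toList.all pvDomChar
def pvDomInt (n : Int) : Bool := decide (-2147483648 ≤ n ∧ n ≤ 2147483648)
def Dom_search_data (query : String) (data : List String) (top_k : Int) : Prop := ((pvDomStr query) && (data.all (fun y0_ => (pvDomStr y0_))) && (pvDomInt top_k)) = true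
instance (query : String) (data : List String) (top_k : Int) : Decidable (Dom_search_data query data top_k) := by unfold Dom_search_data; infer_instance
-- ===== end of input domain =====

-- B replaces the stable descending sort by a counting-sort sweep over scores (alternative decomposition, same results).

-- ===== PORT A =====
-- helper shared by both Pythons: normalize_query (identical in Source A and Source B)
def normalize_query (query : String) : String :=
  let q := PySem.Str.lower query
  let q := PySem.Str.replace q "ml" "machine learning"
  let q := PySem.Str.replace q "ai" "artificial intelligence"
  let q := PySem.Str.replace q "dl" "deep learning"
  PySem.Str.replace q "dbms" "database management system"

def search_data (query : String) (data : List String) (top_k : Int) : List String :=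
  let q := normalize_query query
  let query_words := PySem.Str.split₀ q
  let scored : List (String × Int) :=
    data.foldl (fun scored row =>
      let score : Int := query_words.foldl
        (fun score word => if PySem.Str.isIn word row then score + 1 else score) 0
      if score > 0 then scored ++ [(row, score)] else scored) []
  if scored = [] then []
  else (PySem.List.slice (PySem.List.sorted scored (fun x => x.2) true) none (some top_k)).map
        (fun x => x.1)

-- ===== PORT B =====
def search_data_alt (query : String) (data : List String) (top_k : Int) : List String :=
  let words := PySem.Str.split₀ (normalize_query query)
  let scored : List (String × Int) :=
    data.map (fun row => (row, (words.countP (fun w => PySem.Str.isIn w row) : Int)))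
  let ranked :=
    (PySem.List.pyRange (words.length : Int) 0 (-1)).foldl
      (fun ranked s => ranked ++ (scored.filter (fun p => p.2 == s)).map (fun p => p.1)) []
  PySem.List.slice ranked none (some top_k)

-- ===== PRECONDITION & SPEC =====
def Spec_search_data (query : String) (data : List String) (top_k : Int) (out : List String) : Prop := out = search_data_alt query data top_k
instance (query : String) (data : List String) (top_k : Int) (out : List String) : Decidable (Spec_search_data query data top_k out) := by unfold Spec_search_data; infer_instance

-- ===== CLAIM (what is proved, stated in full; the proofs are below) =====
def Claim_equal_search_data : Prop := ∀ (query : String) (data : List String) (top_k : Int), Dom_search_data query data top_k → Spec_search_data query data top_k (search_data query data top_k)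

-- ===== LEMMAS AND PROOFS =====


def pvG (l : List Int) (xs : List (String × Int)) : List (String × Int) :=
  l.flatMap (fun s => xs.filter (fun p => p.2 == s))

theorem pvInsertBy_append (before : (String × Int) → (String × Int) → Bool) (x : String × Int)
    (pre suf : List (String × Int)) (h : ∀ y ∈ pre, before x y = false) :
    PySem.List.insertBy before x (pre ++ suf) = pre ++ PySem.List.insertBy before x suf := by
  induction pre with
  | nil => simp
  | cons y t ih =>
    have hy : before x y = false := h y (by simp)
    have hstep : PySem.List.insertBy before x (y :: (t ++ suf)) =
        if before x y then x :: y :: (t ++ suf) else y :: PySem.List.insertBy before x (t ++ suf) := rfl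
    simp [hstep, hy, ih (fun z hz => h z (by simp [hz]))]

theorem pvG_mem (l : List Int) (xs : List (String × Int)) (p : String × Int)
    (h : p ∈ pvG l xs) : p.2 ∈ l := by
  simp only [pvG, List.mem_flatMap, List.mem_filter, beq_iff_eq] at h
  obtain ⟨s, hs, _, he⟩ := h
  exact he ▸ hs

theorem pvG_append_not_mem (l : List Int) (x : String × Int) (ys : List (String × Int))
    (hx : x.2 ∉ l) : pvG l (ys ++ [x]) = pvG l ys := by
  induction l with
  | nil => rfl
  | cons s rest ih =>
    have hs : (x.2 == s) = false := by
      simp only [beq_eq_false_iff_ne]; intro he; exact hx (by simp [he])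
    simp only [pvG, List.flatMap_cons, List.filter_append] at *
    simp [hs, ih (fun hm => hx (by simp [hm]))]

theorem pvG_insert (l : List Int) (x : String × Int) (ys : List (String × Int))
    (hp : l.Pairwise (fun a b => b < a)) (hmem : x.2 ∈ l) :
    PySem.List.insertBy (fun a b => decide (b.2 < a.2)) x (pvG l ys) = pvG l (ys ++ [x]) := by
  induction l with
  | nil => simp at hmem
  | cons s rest ih =>
    have hlt : ∀ t ∈ rest, t < s := fun t ht => (List.pairwise_cons.mp hp).1 t ht
    have hrest : rest.Pairwise (fun a b => b < a) := (List.pairwise_cons.mp hp).2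
    have hG : pvG (s :: rest) ys = ys.filter (fun p => p.2 == s) ++ pvG rest ys := by
      simp [pvG]
    by_cases hx : x.2 = s
    · have hpre : ∀ y ∈ ys.filter (fun p => p.2 == s),
          (fun a b => decide (b.2 < a.2)) x y = false := by
        intro y hy
        have : y.2 = s := by simpa using (List.mem_filter.mp hy).2
        simp [this, hx]
      have hsuf : PySem.List.insertBy (fun a b => decide (b.2 < a.2)) x (pvG rest ys) =
          x :: pvG rest ys := by
        cases hG' : pvG rest ys with
        | nil => rfl
        | cons h t =>
          have hh : h.2 ∈ rest := pvG_mem rest ys h (by rw [hG']; simp)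
          have : (decide (h.2 < x.2)) = true := by
            have := hlt h.2 hh; simp [hx]; omega
          show (if decide (h.2 < x.2) then _ else _) = _
          simp [this]
      have hnm : x.2 ∉ rest := by
        intro hm; have := hlt x.2 hm; omega
      rw [hG, pvInsertBy_append _ _ _ _ hpre, hsuf]
      have h1 : pvG (s :: rest) (ys ++ [x]) =
          (ys ++ [x]).filter (fun p => p.2 == s) ++ pvG rest (ys ++ [x]) := by
        simp [pvG]
      rw [h1, pvG_append_not_mem rest x ys hnm, List.filter_append]
      simp [hx]
    · have hmem' : x.2 ∈ rest := by
        rcases List.mem_cons.mp hmem with h | h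
        · exact absurd h hx
        · exact h
      have hxs : x.2 < s := hlt x.2 hmem'
      have hpre : ∀ y ∈ ys.filter (fun p => p.2 == s),
          (fun a b => decide (b.2 < a.2)) x y = false := by
        intro y hy
        have : y.2 = s := by simpa using (List.mem_filter.mp hy).2
        simp [this]; omega
      rw [hG, pvInsertBy_append _ _ _ _ hpre, ih hrest hmem']
      have hs : (x.2 == s) = false := by simp [hx]
      simp [pvG, hs]

theorem pvSorted_eq_G (l : List Int) (hp : l.Pairwise (fun a b => b < a))
    (xs : List (String × Int)) (hb : ∀ p ∈ xs, p.2 ∈ l) :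
    PySem.List.sorted xs (fun p => p.2) true = pvG l xs := by
  induction xs using List.reverseRecOn with
  | nil =>
    have : pvG l ([] : List (String × Int)) = [] := by simp [pvG]
    rw [this]; rfl
  | append_singleton ys x ih =>
    rw [PySem.List.sorted_rev_eq_foldl_insertBy, List.foldl_append]
    simp only [List.foldl_cons, List.foldl_nil]
    rw [← PySem.List.sorted_rev_eq_foldl_insertBy,
        ih (fun p hpm => hb p (by simp [hpm]))]
    exact pvG_insert l x ys hp (hb x (by simp))

theorem pvDesc_pairwise (m : Nat) :
    (PySem.List.pyRange (m : Int) 0 (-1)).Pairwise (fun a b => b < a) := by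
  rw [PySem.List.pyRange_neg_one]
  exact List.Pairwise.map _ (fun a b h => by omega) List.pairwise_lt_range

theorem pvDesc_mem (m : Nat) (s : Int) (h1 : 0 < s) (h2 : s ≤ (m : Int)) :
    s ∈ PySem.List.pyRange (m : Int) 0 (-1) := by
  rw [PySem.List.pyRange_neg_one]
  simp only [List.mem_map, List.mem_range]
  exact ⟨((m : Int) - s).toNat, by omega, by omega⟩

theorem pvDesc_pos (m : Nat) (s : Int) (h : s ∈ PySem.List.pyRange (m : Int) 0 (-1)) :
    1 ≤ s := by
  rw [PySem.List.pyRange_neg_one] at h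
  simp only [List.mem_map, List.mem_range] at h
  obtain ⟨k, hk, he⟩ := h
  omega

theorem pvFoldl_scored (f : String → Int) (data : List String) :
    data.foldl (fun acc row => if f row > 0 then acc ++ [(row, f row)] else acc) [] =
    (data.map (fun row => (row, f row))).filter (fun p => 0 < p.2) := by
  suffices h : ∀ acc, data.foldl (fun acc row => if f row > 0 then acc ++ [(row, f row)] else acc) acc
      = acc ++ (data.map (fun row => (row, f row))).filter (fun p => 0 < p.2) by
    simpa using h []
  induction data with
  | nil => intro acc; simp
  | cons r t ih =>
    intro acc
    by_cases hr : f r > 0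
    · simp [List.foldl_cons, hr, ih]
    · simp [List.foldl_cons, hr, ih]

theorem pvG_filter_pos (l : List Int) (hl : ∀ s ∈ l, 1 ≤ s) (xs : List (String × Int)) :
    pvG l (xs.filter (fun p => 0 < p.2)) = pvG l xs := by
  induction l with
  | nil => rfl
  | cons s rest ih =>
    have hfun : ∀ a : String × Int, ((a.2 == s) && decide (0 < a.2)) = (a.2 == s) := by
      intro a
      by_cases ha : a.2 = s
      · have := hl s (by simp)
        simp [ha]; omega
      · simp [ha]
    simp only [pvG, List.flatMap_cons] at *
    rw [List.filter_filter, funext hfun, ih (fun t ht => hl t (by simp [ht]))]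

theorem pvSlice_map (f : String × Int → String) (xs : List (String × Int)) (b : Int) :
    PySem.List.slice (xs.map f) none (some b) = (PySem.List.slice xs none (some b)).map f := by
  simp [PySem.List.slice, List.map_take]

theorem pvMain (words : List String) (data : List String) (top_k : Int) :
    (let scored : List (String × Int) := data.foldl (fun scored row =>
        let score : Int := words.foldl
          (fun score word => if PySem.Str.isIn word row then score + 1 else score) 0
        if score > 0 then scored ++ [(row, score)] else scored) [];
      if scored = [] then []
      else (PySem.List.slice (PySem.List.sorted scored (fun x => x.2) true) none (some top_k)).map
        (fun x => x.1)) =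
    PySem.List.slice ((PySem.List.pyRange (words.length : Int) 0 (-1)).foldl
      (fun ranked s => ranked ++
        ((data.map (fun row => (row, (words.countP (fun w => PySem.Str.isIn w row) : Int)))).filter
          (fun p => p.2 == s)).map (fun p => p.1)) [])
      none (some top_k) := by
  simp only []
  have hscore : (fun row => ((row : String),
      words.foldl (fun score word => if PySem.Str.isIn word row then score + 1 else score) 0)) =
      (fun row => (row, (words.countP (fun w => PySem.Str.isIn w row) : Int))) := by
    funext row
    rw [PySem.List.foldl_if_add_one]
    simp
  have hA : data.foldl (fun scored row =>
      let score : Int := words.foldl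
        (fun score word => if PySem.Str.isIn word row then score + 1 else score) 0
      if score > 0 then scored ++ [(row, score)] else scored) [] =
      ((data.map (fun row => (row, (words.countP (fun w => PySem.Str.isIn w row) : Int)))).filter
        (fun p => 0 < p.2)) := by
    rw [pvFoldl_scored (fun row => words.foldl
        (fun score word => if PySem.Str.isIn word row then score + 1 else score) 0) data]
    rw [hscore]
  rw [hA]
  rw [PySem.List.foldl_append_eq_flatMap, List.nil_append]
  set scB := data.map (fun row => (row, (words.countP (fun w => PySem.Str.isIn w row) : Int)))
    with hscB
  set l := PySem.List.pyRange (words.length : Int) 0 (-1) with hl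
  have hflat : l.flatMap (fun s => (scB.filter (fun p => p.2 == s)).map (fun p => p.1)) =
      (pvG l scB).map (fun p => p.1) := by
    rw [pvG, List.map_flatMap]
  rw [hflat]
  have hGeq : pvG l scB = pvG l (scB.filter (fun p => 0 < p.2)) :=
    (pvG_filter_pos l (fun s hs => pvDesc_pos words.length s hs) scB).symm
  have hsorted : PySem.List.sorted (scB.filter (fun p => 0 < p.2)) (fun x => x.2) true =
      pvG l (scB.filter (fun p => 0 < p.2)) := by
    apply pvSorted_eq_G l (pvDesc_pairwise words.length)
    intro p hp
    have hpos : 0 < p.2 := by simpa using (List.mem_filter.mp hp).2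
    have hmem : p ∈ scB := (List.mem_filter.mp hp).1
    have hle : p.2 ≤ (words.length : Int) := by
      rw [hscB] at hmem
      obtain ⟨row, _, he⟩ := List.mem_map.mp hmem
      have hcl := List.countP_le_length (p := fun w => PySem.Str.isIn w row) (l := words)
      have hp2 : p.2 = (List.countP (fun w => PySem.Str.isIn w row) words : Int) := by
        rw [← he]
      rw [hp2]
      exact_mod_cast hcl
    exact pvDesc_mem words.length p.2 hpos hle
  by_cases hnil : scB.filter (fun p => 0 < p.2) = []
  · rw [hGeq, hnil]
    have : pvG l ([] : List (String × Int)) = [] := by simp [pvG]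
    rw [this]
    simp [PySem.List.slice]
  · rw [if_neg hnil, hsorted, ← pvSlice_map, ← hGeq]

-- ===== VERDICT (by name: the statement is the Claim_ definition above) =====
theorem search_data_spec : Claim_equal_search_data := by
  intro query data top_k _
  unfold Spec_search_data search_data search_data_alt
  exact pvMain (PySem.Str.split₀ (normalize_query query)) data top_k
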